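-- pv_equiv track=rewrite | github.com/nitishthorat/Bactracking-1 | Problem-2.py | checkExp
-- ===== SOURCE A (Python) =====
-- def checkExp(expression, target):
--     digits = []
--     lastSign = '+'
--
--     curNum = 0
--     for i in range(len(expression)):
--         exp = expression[i]
--
--         if exp.isdigit():
--             curNum = curNum * 10 + int(exp)
--
--         elif exp in ('+', '-', '*'):
--             if lastSign == '+':
--                 digits.append(curNum)
--             elif lastSign == '-':
--                 digits.append(-curNum)
--             elif lastSign == '*':
--                 num = digits.pop()
--                 digits.append(num * curNum)
--
--             lastSign = exp
--             curNum = 0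
--
--     if lastSign == '+':
--         digits.append(curNum)
--     elif lastSign == '-':
--         digits.append(-curNum)
--     elif lastSign == '*':
--         num = digits.pop()
--         digits.append(num * curNum)
--
--     while len(digits) > 1:
--         num1 = digits.pop()
--         num2 = digits.pop()
--         digits.append(num1+num2)
--
--     if digits[0] == target:
--         return True
--     else:
--         return False
-- ===== SOURCE B (Python) =====
-- def checkExp(expression, target):
--     result = 0
--     prev = 0
--     cur = 0
--     last = '+'
--     for ch in expression:
--         if ch.isdigit():
--             cur = cur * 10 + int(ch)
--         elif ch in ('+', '-', '*'):
--             if last == '+':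
--                 result += prev
--                 prev = cur
--             elif last == '-':
--                 result += prev
--                 prev = -cur
--             elif last == '*':
--                 prev = prev * cur
--             last = ch
--             cur = 0
--     if last == '+':
--         result += prev
--         prev = cur
--     elif last == '-':
--         result += prev
--         prev = -cur
--     elif last == '*':
--         prev = prev * cur
--     return result + prev == target
-- ===== Notes on version B (the rewrite author's own statement) =====
-- stated objective: simpler
-- what changed: Replaces A's stack of signed terms plus a final pop-pop-append summing loop with three scalars (running sum, last term, current number) folded in one pass, so no list is built or re-scanned.
import Mathlib
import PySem

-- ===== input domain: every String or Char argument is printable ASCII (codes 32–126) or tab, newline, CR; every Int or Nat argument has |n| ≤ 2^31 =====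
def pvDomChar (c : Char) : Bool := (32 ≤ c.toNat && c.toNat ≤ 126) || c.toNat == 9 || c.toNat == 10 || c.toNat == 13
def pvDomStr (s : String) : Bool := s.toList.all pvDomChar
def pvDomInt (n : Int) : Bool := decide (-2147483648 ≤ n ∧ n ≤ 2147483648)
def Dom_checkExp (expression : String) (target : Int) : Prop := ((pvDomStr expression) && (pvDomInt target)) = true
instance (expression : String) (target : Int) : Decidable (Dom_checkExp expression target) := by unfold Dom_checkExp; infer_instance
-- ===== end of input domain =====

-- B replaces A's stack of signed terms and its final summing loop with three scalar accumulators in one pass (objective: simpler).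


-- ===== PORT A =====
-- the stack `digits` is kept head-first (push = cons, pop = head), the usual list representation of a Python stack.
-- fold of one completed number into the stack: the three-branch if that appears twice in A's code
def checkExpFoldA (digits : List Int) (lastSign : Char) (cur : Int) : List Int :=
  if lastSign = '+' then cur :: digits
  else if lastSign = '-' then (-cur) :: digits
  else if lastSign = '*' then
    match digits with
    | [] => []            -- digits.pop() on an empty list raises in Python; unreachable from A's initial state (lastSign = '*' implies a nonempty stack)
    | num :: rest => (num * cur) :: rest
  else digits

-- the for-loop over the characters, state = (digits, lastSign, curNum)
def checkExpLoopA : List Char → List Int → Char → Int → List Int × Char × Int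
  | [], digits, lastSign, cur => (digits, lastSign, cur)
  | c :: cs, digits, lastSign, cur =>
    if PySem.Chars.isdigit c then
      checkExpLoopA cs digits lastSign (cur * 10 + ((c.toNat : Int) - 48))  -- int(exp) of a single ASCII digit char
    else if c = '+' ∨ c = '-' ∨ c = '*' then
      checkExpLoopA cs (checkExpFoldA digits lastSign cur) c 0
    else
      checkExpLoopA cs digits lastSign cur

-- the final while-loop: pop two, push their sum, until at most one element remains
def checkExpSumA : List Int → List Int
  | n1 :: n2 :: rest => checkExpSumA ((n1 + n2) :: rest)
  | l => l
termination_by l => l.length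

def checkExp (expression : String) (target : Int) : Bool :=
  -- the stack is nonempty after the final fold, so the while-loop leaves a singleton; digits[0] is its element
  decide ((checkExpSumA (checkExpFoldA (checkExpLoopA expression.toList [] '+' 0).1
    (checkExpLoopA expression.toList [] '+' 0).2.1
    (checkExpLoopA expression.toList [] '+' 0).2.2)).headD 0 = target)

-- ===== PORT B =====
-- one operator/end-of-string fold step on the scalar state (result, prev)
def checkExpFoldB (result prev : Int) (lastSign : Char) (cur : Int) : Int × Int :=
  if lastSign = '+' then (result + prev, cur)
  else if lastSign = '-' then (result + prev, -cur)
  else if lastSign = '*' then (result, prev * cur)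
  else (result, prev)

-- the for-loop, state = (result, prev, cur, last)
def checkExpLoopB : List Char → Int → Int → Int → Char → Int × Int × Int × Char
  | [], result, prev, cur, last => (result, prev, cur, last)
  | c :: cs, result, prev, cur, last =>
    if PySem.Chars.isdigit c then
      checkExpLoopB cs result prev (cur * 10 + ((c.toNat : Int) - 48)) last
    else if c = '+' ∨ c = '-' ∨ c = '*' then
      checkExpLoopB cs (checkExpFoldB result prev last cur).1 (checkExpFoldB result prev last cur).2 0 c
    else
      checkExpLoopB cs result prev cur last

def checkExp_alt (expression : String) (target : Int) : Bool :=
  decide ((checkExpFoldB (checkExpLoopB expression.toList 0 0 0 '+').1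
      (checkExpLoopB expression.toList 0 0 0 '+').2.1
      (checkExpLoopB expression.toList 0 0 0 '+').2.2.2
      (checkExpLoopB expression.toList 0 0 0 '+').2.2.1).1
    + (checkExpFoldB (checkExpLoopB expression.toList 0 0 0 '+').1
      (checkExpLoopB expression.toList 0 0 0 '+').2.1
      (checkExpLoopB expression.toList 0 0 0 '+').2.2.2
      (checkExpLoopB expression.toList 0 0 0 '+').2.2.1).2 = target)

-- ===== PRECONDITION & SPEC =====
def Spec_checkExp (expression : String) (target : Int) (out : Bool) : Prop := out = checkExp_alt expression target
instance (expression : String) (target : Int) (out : Bool) : Decidable (Spec_checkExp expression target out) := by unfold Spec_checkExp; infer_instance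

-- ===== CLAIM (what is proved, stated in full; the proofs are below) =====
def Claim_equal_checkExp : Prop := ∀ (expression : String) (target : Int), Dom_checkExp expression target → Spec_checkExp expression target (checkExp expression target)

-- ===== LEMMAS AND PROOFS =====

-- relation between A's stack and B's scalars: top of stack = prev, sum of the rest = result;
-- lastSign = '*' forces a nonempty stack (so A's pop never hits an empty list), and lastSign is always one of the three operators
def pvRel (digits : List Int) (result prev : Int) (lastSign : Char) : Prop :=
  digits.headD 0 = prev ∧ digits.tail.sum = result ∧ (lastSign = '*' → digits ≠ []) ∧
    (lastSign = '+' ∨ lastSign = '-' ∨ lastSign = '*')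

theorem pvRel_fold (digits : List Int) (result prev : Int) (lastSign : Char) (cur : Int)
    (h : pvRel digits result prev lastSign) :
    checkExpFoldA digits lastSign cur ≠ [] ∧
    (checkExpFoldA digits lastSign cur).headD 0 = (checkExpFoldB result prev lastSign cur).2 ∧
    (checkExpFoldA digits lastSign cur).tail.sum = (checkExpFoldB result prev lastSign cur).1 := by
  obtain ⟨h1, h2, h3, h4⟩ := h
  unfold checkExpFoldA checkExpFoldB
  split_ifs with hp hm hs
  · cases digits <;> simp_all; omega
  · cases digits <;> simp_all; omega
  · cases digits with
    | nil => exact absurd (h3 hs) (by simp)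
    | cons a l => simp_all
  · simp_all

theorem pvLoop_rel (cs : List Char) (digits : List Int) (result prev cur : Int) (lastSign : Char)
    (h : pvRel digits result prev lastSign) :
    pvRel (checkExpLoopA cs digits lastSign cur).1 (checkExpLoopB cs result prev cur lastSign).1
      (checkExpLoopB cs result prev cur lastSign).2.1 (checkExpLoopA cs digits lastSign cur).2.1 ∧
    (checkExpLoopA cs digits lastSign cur).2.2 = (checkExpLoopB cs result prev cur lastSign).2.2.1 ∧
    (checkExpLoopA cs digits lastSign cur).2.1 = (checkExpLoopB cs result prev cur lastSign).2.2.2 := by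
  induction cs generalizing digits result prev cur lastSign with
  | nil => exact ⟨h, rfl, rfl⟩
  | cons c cs ih =>
    simp only [checkExpLoopA, checkExpLoopB]
    split_ifs with hd ho
    · exact ih digits result prev _ lastSign h
    · have hf := pvRel_fold digits result prev lastSign cur h
      exact ih _ _ _ 0 c ⟨hf.2.1, hf.2.2, fun _ => hf.1, ho⟩
    · exact ih digits result prev cur lastSign h

-- the summing while-loop applied to a nonempty stack leaves a list whose first element is the stack's sum
theorem checkExpSumA_headD (l : List Int) (h : l ≠ []) : (checkExpSumA l).headD 0 = l.sum := by
  fun_induction checkExpSumA l with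
  | case1 n1 n2 rest ih =>
    rw [ih (by simp)]; simp [add_assoc]
  | case2 l hl =>
    cases l with
    | nil => exact absurd rfl h
    | cons a t =>
      cases t with
      | nil => simp
      | cons b t2 => exact absurd rfl (hl a b t2)

-- ===== VERDICT (by name: the statement is the Claim_ definition above) =====
theorem checkExp_spec : Claim_equal_checkExp := by
  intro expression target _
  unfold Spec_checkExp checkExp checkExp_alt
  have h0 : pvRel [] 0 0 '+' := ⟨rfl, rfl, by simp, Or.inl rfl⟩
  obtain ⟨hrel, hcur, hlast⟩ := pvLoop_rel expression.toList [] 0 0 0 '+' h0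
  set a := checkExpLoopA expression.toList [] '+' 0 with ha
  set b := checkExpLoopB expression.toList 0 0 0 '+' with hb
  rw [← hcur, ← hlast]
  have hf := pvRel_fold a.1 b.1 b.2.1 a.2.1 a.2.2 hrel
  rw [checkExpSumA_headD _ hf.1]
  have hsum : (checkExpFoldA a.1 a.2.1 a.2.2).sum
      = (checkExpFoldB b.1 b.2.1 a.2.1 a.2.2).1 + (checkExpFoldB b.1 b.2.1 a.2.1 a.2.2).2 := by
    cases hD : checkExpFoldA a.1 a.2.1 a.2.2 with
    | nil => exact absurd hD hf.1
    | cons x xs =>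
      have h1 := hf.2.1
      have h2 := hf.2.2
      rw [hD] at h1 h2
      simp at h1 h2
      simp [h1, h2]
      omega
  rw [hsum]
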